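-- pv_equiv track=rewrite | github.com/quangdang46/TH_CTRR | Lab 10/52100174.py | breadthFirstSearchV
-- ===== SOURCE A (Python) =====
-- def breadthFirstSearchV(tree, data):
--     if len(tree) == 0:
--         return None, []
--
--     queue = []
--     queue.append((0, []))
--
--     while len(queue) != 0:
--         curr, path = queue.pop(0)
--         if tree[curr] == data:
--             return curr, path + [tree[curr]]
--         if 2 * curr + 1 < len(tree) and tree[2 * curr + 1] is not None:
--             queue.append((2 * curr + 1, path + [tree[curr]]))
--         if 2 * curr + 2 < len(tree) and tree[2 * curr + 2] is not None:
--             queue.append((2 * curr + 2, path + [tree[curr]]))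
--
--     return None, []
-- ===== SOURCE B (Python) =====
-- def breadthFirstSearchV(tree, data):
--     # Linear scan (index order == BFS order for an array tree with no missing
--     # nodes), then reconstruct the path by walking parent links upward.
--     for i, v in enumerate(tree):
--         if v == data:
--             path = []
--             j = i
--             while True:
--                 path.append(tree[j])
--                 if j == 0:
--                     break
--                 j = (j - 1) // 2
--             return i, path[::-1]
--     return None, []
-- ===== Notes on version B (the rewrite author's own statement) =====
-- stated objective: faster
-- what changed: Replaces the BFS queue of (index, path) pairs (which copies the whole ancestor path on every enqueue) with a plain linear scan of the array (index order equals BFS order for an int-only array tree) plus a single upward parent walk that rebuilds the path of the first match only.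
import Mathlib
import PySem

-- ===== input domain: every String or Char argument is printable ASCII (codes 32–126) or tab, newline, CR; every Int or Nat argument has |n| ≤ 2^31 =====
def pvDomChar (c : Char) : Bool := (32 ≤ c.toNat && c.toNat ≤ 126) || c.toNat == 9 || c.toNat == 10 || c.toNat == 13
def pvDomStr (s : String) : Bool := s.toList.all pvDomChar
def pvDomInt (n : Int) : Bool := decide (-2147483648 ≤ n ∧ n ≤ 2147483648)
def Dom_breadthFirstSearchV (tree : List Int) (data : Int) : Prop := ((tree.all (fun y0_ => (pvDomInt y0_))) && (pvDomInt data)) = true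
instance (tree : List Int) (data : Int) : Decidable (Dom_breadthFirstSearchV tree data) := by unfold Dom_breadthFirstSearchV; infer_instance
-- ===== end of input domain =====

-- B replaces A's BFS queue of (index, path) pairs with a linear scan of the
-- array (index order equals BFS order for an int-only array tree) plus one
-- upward parent walk rebuilding the path of the first match; objective: simpler.


-- ===== PORT A =====
-- weight used only for termination of the BFS loop: number of array slots in
-- the subtree rooted at i (0 if i ≥ n); the lemmas are cited by decreasing_by
lemma bfs_dec_left (n i : Nat) (h : i < n) : n - (2 * i + 1) < n - i := by omega
lemma bfs_dec_right (n i : Nat) (h : i < n) : n - (2 * i + 2) < n - i := by omega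

def bfsDesc (n i : Nat) : Nat :=
  if i < n then 1 + bfsDesc n (2 * i + 1) + bfsDesc n (2 * i + 2) else 0
termination_by n - i
decreasing_by
  · exact bfs_dec_left n i (by assumption)
  · exact bfs_dec_right n i (by assumption)

def bfsMeasure (n : Nat) (queue : List (Nat × List Int)) : Nat :=
  (queue.map (fun p => bfsDesc n p.1)).sum

-- the decrease of the queue measure in one BFS step, cited by decreasing_by
lemma bfs_queue_dec (tree : List Int) (curr : Nat) (path : List Int)
    (rest : List (Nat × List Int)) (v : Int)
    (h : PySem.List.pyGet? tree ((curr : Nat) : Int) = some v) :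
    bfsMeasure tree.length
      (if 2 * curr + 2 < tree.length then
         (if 2 * curr + 1 < tree.length then rest ++ [(2 * curr + 1, path ++ [v])] else rest)
           ++ [(2 * curr + 2, path ++ [v])]
       else
         if 2 * curr + 1 < tree.length then rest ++ [(2 * curr + 1, path ++ [v])] else rest)
      < bfsMeasure tree.length ((curr, path) :: rest) := by
  have hcur : curr < tree.length := by
    by_contra hge
    have : PySem.List.pyGet? tree ((curr : Nat) : Int) = none := by
      simp [PySem.List.pyGet?_natCast]
      omega
    simp [this] at h
  have hd : bfsDesc tree.length curr
      = 1 + bfsDesc tree.length (2 * curr + 1) + bfsDesc tree.length (2 * curr + 2) := by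
    rw [bfsDesc]; simp [hcur]
  split_ifs <;>
    simp only [bfsMeasure, List.map_append, List.sum_append, List.map_cons,
      List.sum_cons, List.map_nil, List.sum_nil] <;>
    omega

-- the 'while len(queue) != 0' loop of A; tree elements are Ints, so the
-- 'tree[child] is not None' guards of A are always true and the 'match' on
-- pyGet? only makes the in-range lookup total (none is unreachable)
def bfsLoop (tree : List Int) (data : Int) (queue : List (Nat × List Int)) :
    Option Int × List Int :=
  match queue with
  | [] => (none, [])
  | (curr, path) :: rest =>
    match h : PySem.List.pyGet? tree ((curr : Nat) : Int) with
    | none => (none, [])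
    | some v =>
      if v = data then (some ((curr : Nat) : Int), path ++ [v])
      else
        bfsLoop tree data
          (if 2 * curr + 2 < tree.length then
             (if 2 * curr + 1 < tree.length then rest ++ [(2 * curr + 1, path ++ [v])] else rest)
               ++ [(2 * curr + 2, path ++ [v])]
           else
             if 2 * curr + 1 < tree.length then rest ++ [(2 * curr + 1, path ++ [v])] else rest)
termination_by bfsMeasure tree.length queue
decreasing_by
  exact bfs_queue_dec tree curr path rest v h

def breadthFirstSearchV (tree : List Int) (data : Int) : Option Int × List Int :=
  if tree.length = 0 then (none, [])
  else bfsLoop tree data [(0, [])]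

-- ===== PORT B =====
-- the parent step decreases the index, cited by decreasing_by
lemma up_dec (j : Nat) (h : ¬ j = 0) : (j - 1) / 2 < j := by
  have := Nat.div_le_self (j - 1) 2
  omega

-- the 'while True' parent walk of B: collects tree[j] going up to the root
def walkUp (tree : List Int) (j : Nat) : List Int :=
  if j = 0 then [PySem.List.pyGetD tree 0 0]
  else PySem.List.pyGetD tree ((j : Nat) : Int) 0 :: walkUp tree ((j - 1) / 2)
termination_by j
decreasing_by
  exact up_dec j (by assumption)

-- the 'for i, v in enumerate(tree)' loop of B
def altLoop (tree : List Int) (data : Int) (i : Nat) (rest : List Int) :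
    Option Int × List Int :=
  match rest with
  | [] => (none, [])
  | v :: rest' =>
    if v = data then (some ((i : Nat) : Int), (walkUp tree i).reverse)
    else altLoop tree data (i + 1) rest'

def breadthFirstSearchV_alt (tree : List Int) (data : Int) : Option Int × List Int :=
  altLoop tree data 0 tree

-- ===== PRECONDITION & SPEC =====
def Spec_breadthFirstSearchV (tree : List Int) (data : Int) (out : Option Int × List Int) : Prop := out = breadthFirstSearchV_alt tree data
instance (tree : List Int) (data : Int) (out : Option Int × List Int) : Decidable (Spec_breadthFirstSearchV tree data out) := by unfold Spec_breadthFirstSearchV; infer_instance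

-- ===== CLAIM (what is proved, stated in full; the proofs are below) =====
def Claim_equal_breadthFirstSearchV : Prop := ∀ (tree : List Int) (data : Int), Dom_breadthFirstSearchV tree data → Spec_breadthFirstSearchV tree data (breadthFirstSearchV tree data)

-- ===== LEMMAS AND PROOFS =====

-- values along the root→i branch, i included (root first)
def ancPath (tree : List Int) (i : Nat) : List Int :=
  if i = 0 then [PySem.List.pyGetD tree 0 0]
  else ancPath tree ((i - 1) / 2) ++ [PySem.List.pyGetD tree ((i : Nat) : Int) 0]
termination_by i
decreasing_by
  exact up_dec i (by assumption)

-- strict ancestors' values (the 'path' stored with index i in A's queue)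
def sp (tree : List Int) (i : Nat) : List Int :=
  if i = 0 then [] else ancPath tree ((i - 1) / 2)

lemma walkUp_eq (tree : List Int) (i : Nat) :
    walkUp tree i = (ancPath tree i).reverse := by
  induction i using Nat.strong_induction_on with
  | _ i IH =>
    rw [walkUp, ancPath]
    by_cases h : i = 0
    · simp [h]
    · have hlt : (i - 1) / 2 < i := by
        have := Nat.div_le_self (i - 1) 2
        omega
      simp [h, IH _ hlt]

lemma ancPath_eq_sp (tree : List Int) (i : Nat) :
    ancPath tree i = sp tree i ++ [PySem.List.pyGetD tree ((i : Nat) : Int) 0] := by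
  by_cases h : i = 0 <;> rw [ancPath] <;> simp [sp, h]

lemma sp_left (tree : List Int) (i : Nat) :
    sp tree (2 * i + 1) = ancPath tree i := by
  unfold sp
  rw [if_neg (by omega)]
  have h : (2 * i + 1 - 1) / 2 = i := by omega
  rw [h]

lemma sp_right (tree : List Int) (i : Nat) :
    sp tree (2 * i + 2) = ancPath tree i := by
  unfold sp
  rw [if_neg (by omega)]
  have h : (2 * i + 2 - 1) / 2 = i := by omega
  rw [h]

-- the queue A holds just before popping index a
def queueOf (tree : List Int) (a : Nat) : List (Nat × List Int) :=
  (List.range' a (min (2 * a + 1) tree.length - a)).map (fun i => (i, sp tree i))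

lemma queueOf_step (tree : List Int) (a : Nat) (ha : a < tree.length) :
    (if 2 * a + 2 < tree.length then
       (if 2 * a + 1 < tree.length then
          ((List.range' (a + 1) (min (2 * a + 1) tree.length - a - 1)).map
             (fun i => (i, sp tree i))) ++ [(2 * a + 1, ancPath tree a)]
        else
          (List.range' (a + 1) (min (2 * a + 1) tree.length - a - 1)).map
             (fun i => (i, sp tree i)))
         ++ [(2 * a + 2, ancPath tree a)]
     else
       if 2 * a + 1 < tree.length then
         ((List.range' (a + 1) (min (2 * a + 1) tree.length - a - 1)).map
            (fun i => (i, sp tree i))) ++ [(2 * a + 1, ancPath tree a)]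
       else
         (List.range' (a + 1) (min (2 * a + 1) tree.length - a - 1)).map
            (fun i => (i, sp tree i)))
    = queueOf tree (a + 1) := by
  unfold queueOf
  by_cases h1 : 2 * a + 1 < tree.length
  · by_cases h2 : 2 * a + 2 < tree.length
    · have e1 : min (2 * a + 1) tree.length - a - 1 = a := by omega
      have e2 : min (2 * (a + 1) + 1) tree.length - (a + 1) = a + 2 := by omega
      rw [if_pos h2, if_pos h1, e1, e2]
      have r2 : List.range' (a + 1) (a + 2) = List.range' (a + 1) (a + 1) ++ [a + 1 + (a + 1)] := by
        simpa using List.range'_concat (s := a + 1) (n := a + 1) (step := 1)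
      have r1 : List.range' (a + 1) (a + 1) = List.range' (a + 1) a ++ [a + 1 + a] := by
        simpa using List.range'_concat (s := a + 1) (n := a) (step := 1)
      have ea : a + 1 + a = 2 * a + 1 := by omega
      have eb : a + 1 + (a + 1) = 2 * a + 2 := by omega
      rw [r2, r1, ea, eb]
      simp [sp_left, sp_right]
    · have e1 : min (2 * a + 1) tree.length - a - 1 = a := by omega
      have e2 : min (2 * (a + 1) + 1) tree.length - (a + 1) = a + 1 := by omega
      rw [if_neg h2, if_pos h1, e1, e2]
      have r1 : List.range' (a + 1) (a + 1) = List.range' (a + 1) a ++ [a + 1 + a] := by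
        simpa using List.range'_concat (s := a + 1) (n := a) (step := 1)
      have ea : a + 1 + a = 2 * a + 1 := by omega
      rw [r1, ea]
      simp [sp_left]
  · have h2 : ¬ 2 * a + 2 < tree.length := by omega
    have e : min (2 * a + 1) tree.length - a - 1
        = min (2 * (a + 1) + 1) tree.length - (a + 1) := by omega
    rw [if_neg h2, if_neg h1, e]

lemma bfsLoop_eq_altLoop (tree : List Int) (data : Int) (a : Nat) (ha : a < tree.length) :
    bfsLoop tree data (queueOf tree a) = altLoop tree data a (tree.drop a) := by
  have hq : queueOf tree a
      = (a, sp tree a) :: (List.range' (a + 1) (min (2 * a + 1) tree.length - a - 1)).map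
          (fun i => (i, sp tree i)) := by
    unfold queueOf
    obtain ⟨k, hk⟩ : ∃ k, min (2 * a + 1) tree.length - a = k + 1 :=
      ⟨min (2 * a + 1) tree.length - a - 1, by omega⟩
    rw [hk]
    simp [List.range'_succ]
  have hget : PySem.List.pyGet? tree ((a : Nat) : Int) = some tree[a] := by
    simp [PySem.List.pyGet?_natCast, List.getElem?_eq_getElem ha]
  have hdrop : tree.drop a = tree[a] :: tree.drop (a + 1) :=
    List.drop_eq_getElem_cons ha
  have hgd : PySem.List.pyGetD tree ((a : Nat) : Int) 0 = tree[a] := by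
    simp [PySem.List.pyGetD_natCast, List.getD, List.getElem?_eq_getElem ha]
  rw [hq, hdrop, bfsLoop.eq_def, altLoop.eq_def]
  split
  · next heq => exact absurd heq (by simp)
  · next curr path rest heq =>
    injection heq with h1 h2
    injection h1 with hc hp
    subst hc; subst hp; subst h2
    split
    · next heq2 => rw [hget] at heq2; exact absurd heq2 (by simp)
    · next v heq2 =>
      rw [hget] at heq2
      injection heq2 with hveq
      subst hveq
      by_cases hv : tree[a] = data
      · simp [hv, walkUp_eq, ancPath_eq_sp, hgd]
      · simp only [if_neg hv]
        have hstep := queueOf_step tree a ha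
        simp only [ancPath_eq_sp, hgd] at hstep
        rw [hstep]
        by_cases hlast : a + 1 < tree.length
        · exact bfsLoop_eq_altLoop tree data (a + 1) hlast
        · have hempty : queueOf tree (a + 1) = [] := by
            unfold queueOf
            have : min (2 * (a + 1) + 1) tree.length - (a + 1) = 0 := by omega
            simp [this]
          have hnil : tree.drop (a + 1) = [] := by
            apply List.drop_eq_nil_of_le; omega
          rw [hempty, hnil, bfsLoop.eq_def, altLoop.eq_def]
termination_by tree.length - a
decreasing_by omega

-- ===== VERDICT (by name: the statement is the Claim_ definition above) =====
theorem breadthFirstSearchV_spec : Claim_equal_breadthFirstSearchV := by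
  intro tree data _
  unfold Spec_breadthFirstSearchV breadthFirstSearchV breadthFirstSearchV_alt
  by_cases h : tree.length = 0
  · rw [if_pos h]
    have : tree = [] := List.length_eq_zero_iff.mp h
    rw [this, altLoop.eq_def]
  · rw [if_neg h]
    have h0 : 0 < tree.length := by omega
    have hq : queueOf tree 0 = [(0, [])] := by
      unfold queueOf
      have e : min 1 tree.length = 1 := by omega
      simp [e, sp]
    rw [← hq, bfsLoop_eq_altLoop tree data 0 h0]
    simp
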